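-- pv_equiv track=rewrite | github.com/Meloweh/Scripts-For-The-fx-cg50 | atableV2.py | binary_to_letter
-- ===== SOURCE A (Python) =====
-- def binary_to_letter(s, varcount, varname='x'):
--     out = ''
--     counter = varcount - 1
--     varname = chr(ord(varname) - 32)#varname.capitalize()
--     c = varname + str(counter)
--     more = False
--     n = 0
--     for i in range(len(s)):
--         if more == False:
--             if s[i] == '1':
--                 out = out + ('*' if len(out) > 0 else '') + c
--             elif s[i] == '0':
--                 out = out + ('*' if len(out) > 0 else '') + c + '\''
--         if more == True:
--             if s[i] == '1':
--                 out = out + ('*' if len(out) > 0 else '') + c + str(n)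
--             elif s[i] == '0':
--                 out = out + ('*' if len(out) > 0 else '') + c + str(n) + '\''
--
--             n+=1
--         if c=='z' and more == False:
--             c = 'A'
--         elif c=='Z':
--             c = 'a'
--             more = True
--
--         elif more == False:
--             counter = counter - 1
--             c = varname + str(counter) #chr(ord(c)+1)
--     return out
-- ===== SOURCE B (Python) =====
-- def binary_to_letter(s, varcount, varname='x'):
--     v = chr(ord(varname) - 32)
--     toks = []
--     for i, ch in enumerate(s):
--         sym = v + str(varcount - 1 - i)
--         if ch == '1':
--             toks.append(sym)
--         elif ch == '0':
--             toks.append(sym + "'")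
--     return '*'.join(toks)
-- ===== Notes on version B (the rewrite author's own statement) =====
-- stated objective: simpler
-- what changed: Drops A's more/n/A-Z state machine (dead for multi-char symbols) and the running counter with conditional '*' concatenation: B derives each symbol in closed form from the character's index and joins the collected tokens with '*'.join.
import Mathlib
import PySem

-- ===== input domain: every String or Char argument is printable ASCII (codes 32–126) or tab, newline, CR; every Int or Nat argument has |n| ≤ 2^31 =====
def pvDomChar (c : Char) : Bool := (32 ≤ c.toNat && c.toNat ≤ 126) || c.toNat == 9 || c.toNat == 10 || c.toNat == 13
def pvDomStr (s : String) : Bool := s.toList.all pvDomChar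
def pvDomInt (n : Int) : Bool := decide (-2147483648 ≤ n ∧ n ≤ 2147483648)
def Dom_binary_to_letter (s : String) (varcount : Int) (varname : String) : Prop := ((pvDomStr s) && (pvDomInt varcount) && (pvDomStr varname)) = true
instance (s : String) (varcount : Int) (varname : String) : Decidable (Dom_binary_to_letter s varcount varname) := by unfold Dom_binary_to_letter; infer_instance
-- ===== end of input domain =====

-- B drops A's dead more/n/'z'/'Z' state machine and running counter: symbols come from the
-- character's index in closed form and the tokens are joined with '*' (objective: simpler).


-- ===== PORT A =====
-- one loop iteration of A: state is (out, counter, c, more, n); branches in A's order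
def pvAStep (V : Char) (st : List Char × Int × List Char × Bool × Int) (ch : Char) :
    List Char × Int × List Char × Bool × Int :=
  let (out, counter, c, more, n) := st
  let out :=
    if more = false then
      if ch = '1' then out ++ (if out.length > 0 then ['*'] else []) ++ c
      else if ch = '0' then out ++ (if out.length > 0 then ['*'] else []) ++ c ++ ['\'']
      else out
    else out
  let (out, n) :=
    if more = true then
      (if ch = '1' then out ++ (if out.length > 0 then ['*'] else []) ++ c ++ PySem.Int.toChars n
       else if ch = '0' then out ++ (if out.length > 0 then ['*'] else []) ++ c ++ PySem.Int.toChars n ++ ['\'']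
       else out, n + 1)
    else (out, n)
  if c = ['z'] ∧ more = false then (out, counter, ['A'], more, n)
  else if c = ['Z'] then (out, counter, ['a'], true, n)
  else if more = false then (out, counter - 1, V :: PySem.Int.toChars (counter - 1), more, n)
  else (out, counter, c, more, n)

def binary_to_letter (s : String) (varcount : Int) (varname : String) : String :=
  match varname.toList with
  | [v0] =>
    -- chr(ord(varname) - 32); exact for v0.toNat ≥ 32 (Pre_); A raises ValueError below 32
    let V : Char := Char.ofNat (v0.toNat - 32)
    let counter := varcount - 1
    let c := V :: PySem.Int.toChars counter
    String.mk (s.toList.foldl (pvAStep V) ([], counter, c, false, 0)).1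
  | _ => ""  -- A raises TypeError (ord of a non-single-character string); excluded by Pre_

-- ===== PORT B =====
def binary_to_letter_alt (s : String) (varcount : Int) (varname : String) : String :=
  match varname.toList with
  | v0 :: rest =>
    if rest.isEmpty then
      let V : Char := Char.ofNat (v0.toNat - 32)  -- chr(ord(varname) - 32); exact for v0.toNat ≥ 32 (Pre_)
      let toks := (PySem.List.enumerate s.toList 0).filterMap (fun p =>
        let sym := V :: PySem.Int.toChars (varcount - 1 - p.1)
        if p.2 = '1' then some sym
        else if p.2 = '0' then some (sym ++ ['\'']) else none)
      String.mk (List.intercalate ['*'] toks)  -- '*'.join(toks)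
    else ""  -- B raises TypeError there (ord of a multi-character string); excluded by Pre_
  | [] => ""  -- B raises TypeError there too; excluded by Pre_

-- ===== PRECONDITION & SPEC =====
-- Pre_ excludes exactly the inputs where A raises: varname must be a single character with
-- code ≥ 32 (otherwise ord() raises TypeError or chr() raises ValueError); B raises there too.
def Pre_binary_to_letter (s : String) (varcount : Int) (varname : String) : Prop :=
  varname.toList.length = 1 ∧ 32 ≤ (varname.toList.headD ' ').toNat
instance (s : String) (varcount : Int) (varname : String) : Decidable (Pre_binary_to_letter s varcount varname) := by unfold Pre_binary_to_letter; infer_instance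
def pvWitness_binary_to_letter : String × Int × String := ("1010", 4, "x")
def Spec_binary_to_letter (s : String) (varcount : Int) (varname : String) (out : String) : Prop := out = binary_to_letter_alt s varcount varname
instance (s : String) (varcount : Int) (varname : String) (out : String) : Decidable (Spec_binary_to_letter s varcount varname out) := by unfold Spec_binary_to_letter; infer_instance

-- ===== CLAIM (what is proved, stated in full; the proofs are below) =====
def Claim_equal_binary_to_letter : Prop := ∀ (s : String) (varcount : Int) (varname : String), Dom_binary_to_letter s varcount varname → Pre_binary_to_letter s varcount varname → Spec_binary_to_letter s varcount varname (binary_to_letter s varcount varname)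

-- ===== LEMMAS AND PROOFS =====

-- the token list both programs produce, as a recursive function of the running counter
def pvToks (V : Char) (counter : Int) : List Char → List (List Char)
  | [] => []
  | ch :: t =>
    (if ch = '1' then [V :: PySem.Int.toChars counter]
     else if ch = '0' then [V :: PySem.Int.toChars counter ++ ['\'']] else [])
      ++ pvToks V (counter - 1) t

lemma pvToDigitsCore_len (b : Nat) : ∀ (fuel n : Nat) (ds : List Char),
    ds.length ≤ (Nat.toDigitsCore b fuel n ds).length := by
  intro fuel
  induction fuel with
  | zero => intro n ds; simp [Nat.toDigitsCore]
  | succ f ih =>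
    intro n ds
    simp only [Nat.toDigitsCore]
    split
    · simp
    · exact le_trans (by simp) (ih _ _)

lemma pvToDigits_ne_nil (b m : Nat) : Nat.toDigits b m ≠ [] := by
  show Nat.toDigitsCore b (m + 1) m [] ≠ []
  intro h
  simp only [Nat.toDigitsCore] at h
  split at h
  · simp at h
  · have := pvToDigitsCore_len b m (m / b) [Nat.digitChar (m % b)]
    rw [h] at this
    simp at this

lemma pvToChars_ne_nil (n : Int) : PySem.Int.toChars n ≠ [] := by
  unfold PySem.Int.toChars
  split
  · simp
  · exact pvToDigits_ne_nil 10 n.toNat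

lemma pvC_ne_z (V : Char) (counter : Int) : ¬(V :: PySem.Int.toChars counter = ['z']) := by
  intro h
  rw [List.cons.injEq] at h
  exact pvToChars_ne_nil counter h.2

lemma pvC_ne_Z (V : Char) (counter : Int) : ¬(V :: PySem.Int.toChars counter = ['Z']) := by
  intro h
  rw [List.cons.injEq] at h
  exact pvToChars_ne_nil counter h.2

lemma pvA_loop (V : Char) : ∀ (l : List Char) (counter : Int) (out : List Char),
    (l.foldl (pvAStep V) (out, counter, V :: PySem.Int.toChars counter, false, 0)).1
      = (pvToks V counter l).foldl
          (fun o t => o ++ (if o.length > 0 then ['*'] else []) ++ t) out := by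
  intro l
  induction l with
  | nil => intro counter out; rfl
  | cons ch t ih =>
    intro counter out
    rw [List.foldl_cons]
    have hstep : pvAStep V (out, counter, V :: PySem.Int.toChars counter, false, 0) ch
        = ((if ch = '1' then out ++ (if out.length > 0 then ['*'] else []) ++ (V :: PySem.Int.toChars counter)
            else if ch = '0' then out ++ (if out.length > 0 then ['*'] else []) ++ (V :: PySem.Int.toChars counter) ++ ['\''] else out),
           counter - 1, V :: PySem.Int.toChars (counter - 1), false, 0) := by
      simp only [pvAStep]
      rw [if_neg (by simp [pvC_ne_z V counter]), if_neg (pvC_ne_Z V counter)]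
      simp
    rw [hstep, ih]
    simp only [pvToks]
    by_cases h1 : ch = '1'
    · simp [h1]
    · by_cases h0 : ch = '0'
      · simp [h0]
      · simp [h0, h1]

lemma pvB_toks (V : Char) (varcount : Int) : ∀ (l : List Char) (i : Int),
    (PySem.List.enumerate l i).filterMap (fun p =>
      let sym := V :: PySem.Int.toChars (varcount - 1 - p.1)
      if p.2 = '1' then some sym
      else if p.2 = '0' then some (sym ++ ['\'']) else none)
      = pvToks V (varcount - 1 - i) l := by
  intro l
  induction l with
  | nil => intro i; simp [pvToks, PySem.List.enumerate_nil]
  | cons ch t ih =>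
    intro i
    rw [PySem.List.enumerate_cons, List.filterMap_cons, ih (i + 1)]
    have h2 : varcount - 1 - (i + 1) = varcount - 1 - i - 1 := by ring
    rw [h2]
    simp only [pvToks]
    by_cases h1 : ch = '1'
    · simp [h1]
    · by_cases h0 : ch = '0'
      · simp [h0]
      · simp [h0, h1]

lemma pvJoinAux (ts : List (List Char)) : ∀ (out : List Char), out ≠ [] →
    ts.foldl (fun o t => o ++ (if o.length > 0 then ['*'] else []) ++ t) out
      = out ++ ts.flatMap (fun t => '*' :: t) := by
  induction ts with
  | nil => intro out _; simp
  | cons t ts ih =>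
    intro out hout
    rw [List.foldl_cons]
    have hpos : out.length > 0 := List.length_pos_of_ne_nil hout
    rw [if_pos hpos, ih _ (by simp)]
    simp

lemma pvInterFlat : ∀ (ts : List (List Char)) (t : List Char),
    List.intercalate ['*'] (t :: ts) = t ++ ts.flatMap (fun x => '*' :: x) := by
  intro ts
  induction ts with
  | nil => intro t; simp [List.intercalate]
  | cons u ts ih =>
    intro t
    have h2 : List.intercalate ['*'] (t :: u :: ts) = t ++ ['*'] ++ List.intercalate ['*'] (u :: ts) := by
      simp [List.intercalate, List.intersperse]
    rw [h2, ih u]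
    simp

lemma pvJoin (ts : List (List Char)) (hne : ∀ t ∈ ts, t ≠ []) :
    ts.foldl (fun o t => o ++ (if o.length > 0 then ['*'] else []) ++ t) []
      = List.intercalate ['*'] ts := by
  cases ts with
  | nil => rfl
  | cons t ts =>
    rw [List.foldl_cons]
    simp only [List.length_nil, gt_iff_lt, lt_self_iff_false, if_false, List.nil_append]
    rw [pvJoinAux ts t (hne t (by simp)), pvInterFlat]

lemma pvToks_ne_nil (V : Char) : ∀ (l : List Char) (counter : Int),
    ∀ t ∈ pvToks V counter l, t ≠ [] := by
  intro l
  induction l with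
  | nil => intro counter t ht; simp [pvToks] at ht
  | cons ch tl ih =>
    intro counter t ht
    simp only [pvToks, List.mem_append] at ht
    rcases ht with ht | ht
    · split_ifs at ht <;> simp_all
    · exact ih _ t ht

-- ===== VERDICT (by name: the statement is the Claim_ definition above) =====
theorem binary_to_letter_spec : Claim_equal_binary_to_letter := by
  intro s varcount varname _ hpre
  obtain ⟨hlen, _⟩ := hpre
  unfold Spec_binary_to_letter binary_to_letter binary_to_letter_alt
  match hv : varname.toList with
  | [v0] =>
    simp only
    rw [pvA_loop, pvB_toks, pvJoin _ (pvToks_ne_nil _ _ _)]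
    ring_nf
    simp
  | [] => rw [hv] at hlen
  | _ :: _ :: _ => rw [hv] at hlen; exact absurd hlen (by simp)
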